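-- pv_equiv track=rewrite | github.com/minhchientran/toan_hoc | Giai_Toan.py | tich_chia_het
-- ===== SOURCE A (Python) =====
-- from itertools import permutations, combinations, product
--
-- def tich_chia_het(numbers, num_digits, divisible_by, greater_than, nho_hon):
--     count = 0
--     result = []
--
--     numbers_list = list(numbers)
--
--     for combination in combinations(numbers_list, num_digits):
--         product = 1
--         for digit in combination:
--             product *= digit
--
--         if product % divisible_by == 0 and greater_than < product < nho_hon:
--             count += 1
--             result.append(combination)
--
--     return count, result
-- ===== SOURCE B (Python) =====
-- def tich_chia_het(numbers, num_digits, divisible_by, greater_than, nho_hon):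
--     numbers_list = list(numbers)
--     n = len(numbers_list)
--
--     def go(i, chosen, prod, need):
--         # emitted in the same lexicographic index order as itertools.combinations
--         if need == 0:
--             if prod % divisible_by == 0 and greater_than < prod < nho_hon:
--                 return 1, [tuple(chosen)]
--             return 0, []
--         if i >= n:
--             return 0, []
--         x = numbers_list[i]
--         c1, r1 = go(i + 1, chosen + [x], prod * x, need - 1)
--         c2, r2 = go(i + 1, chosen, prod, need)
--         return c1 + c2, r1 + r2
--
--     return go(0, [], 1, num_digits)
-- ===== Notes on version B (the rewrite author's own statement) =====
-- stated objective: alternative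
-- what changed: Replaces the itertools.combinations materialisation + inner product loop with a single recursive include/skip DFS over index positions that carries the partial tuple and a running product accumulator, emitting combinations in the same lexicographic order.
import Mathlib
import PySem

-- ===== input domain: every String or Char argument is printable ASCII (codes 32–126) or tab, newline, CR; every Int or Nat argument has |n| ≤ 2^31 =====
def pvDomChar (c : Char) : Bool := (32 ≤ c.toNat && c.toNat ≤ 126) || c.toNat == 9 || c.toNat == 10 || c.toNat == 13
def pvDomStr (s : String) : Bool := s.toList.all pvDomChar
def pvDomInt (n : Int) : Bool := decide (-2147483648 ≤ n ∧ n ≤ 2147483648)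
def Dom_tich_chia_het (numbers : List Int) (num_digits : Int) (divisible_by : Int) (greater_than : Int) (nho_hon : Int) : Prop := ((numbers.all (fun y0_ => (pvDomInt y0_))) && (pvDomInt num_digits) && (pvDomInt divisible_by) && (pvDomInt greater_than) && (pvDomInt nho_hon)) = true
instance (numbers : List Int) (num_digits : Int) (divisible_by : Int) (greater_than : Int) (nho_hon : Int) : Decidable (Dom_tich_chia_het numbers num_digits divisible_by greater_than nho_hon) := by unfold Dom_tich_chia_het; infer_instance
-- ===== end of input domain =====

-- B replaces the combinations-list enumeration by an include/skip DFS with a running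
-- product accumulator (objective: alternative decomposition, same asymptotic cost).

-- the shared success test: product % divisible_by == 0 and greater_than < product < nho_hon
def pvOk (divisible_by greater_than nho_hon product : Int) : Bool :=
  (PySem.Int.mod product divisible_by == 0) && decide (greater_than < product) && decide (product < nho_hon)

-- ===== PORT A =====
-- itertools.combinations(numbers_list, r) in lexicographic index order
def pvCombos : Nat → List Int → List (List Int)
  | 0, _ => [[]]
  | _ + 1, [] => []
  | n + 1, x :: xs => (pvCombos n xs).map (fun c => x :: c) ++ pvCombos (n + 1) xs

def tich_chia_het (numbers : List Int) (num_digits : Int) (divisible_by : Int) (greater_than : Int) (nho_hon : Int) : Int × List (List Int) :=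
  let numbers_list := numbers
  (pvCombos num_digits.toNat numbers_list).foldl
    (fun st combination =>
      let product := combination.foldl (fun p digit => p * digit) 1
      if pvOk divisible_by greater_than nho_hon product then (st.1 + 1, st.2 ++ [combination])
      else st)
    ((0 : Int), ([] : List (List Int)))

-- ===== PORT B =====
-- go(i, chosen, prod, need): walking the index positions = structural recursion on the list tail
def pvDfs (divisible_by greater_than nho_hon : Int) : List Int → List Int → Int → Int → Int × List (List Int)
  | xs, chosen, prod, need =>
    if need = 0 then
      (if pvOk divisible_by greater_than nho_hon prod then ((1 : Int), [chosen]) else (0, []))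
    else
      match xs with
      | [] => (0, [])
      | x :: rest =>
        let p1 := pvDfs divisible_by greater_than nho_hon rest (chosen ++ [x]) (prod * x) (need - 1)
        let p2 := pvDfs divisible_by greater_than nho_hon rest chosen prod need
        (p1.1 + p2.1, p1.2 ++ p2.2)

def tich_chia_het_alt (numbers : List Int) (num_digits : Int) (divisible_by : Int) (greater_than : Int) (nho_hon : Int) : Int × List (List Int) :=
  pvDfs divisible_by greater_than nho_hon numbers [] 1 num_digits

-- ===== PRECONDITION & SPEC =====
-- Pre_ excludes exactly the inputs where the Python A raises: a negative num_digits
-- (ValueError from combinations) and divisible_by = 0 when at least one combination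
-- exists (ZeroDivisionError from product % 0).
def Pre_tich_chia_het (numbers : List Int) (num_digits : Int) (divisible_by : Int) (greater_than : Int) (nho_hon : Int) : Prop :=
  0 ≤ num_digits ∧ (num_digits ≤ (numbers.length : Int) → divisible_by ≠ 0)
instance (numbers : List Int) (num_digits : Int) (divisible_by : Int) (greater_than : Int) (nho_hon : Int) : Decidable (Pre_tich_chia_het numbers num_digits divisible_by greater_than nho_hon) := by unfold Pre_tich_chia_het; infer_instance

def pvWitness_tich_chia_het : List Int × Int × Int × Int × Int := ([2, 3, 5], 2, 3, 0, 20)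

def Spec_tich_chia_het (numbers : List Int) (num_digits : Int) (divisible_by : Int) (greater_than : Int) (nho_hon : Int) (out : Int × List (List Int)) : Prop := out = tich_chia_het_alt numbers num_digits divisible_by greater_than nho_hon
instance (numbers : List Int) (num_digits : Int) (divisible_by : Int) (greater_than : Int) (nho_hon : Int) (out : Int × List (List Int)) : Decidable (Spec_tich_chia_het numbers num_digits divisible_by greater_than nho_hon out) := by unfold Spec_tich_chia_het; infer_instance

-- ===== CLAIM (what is proved, stated in full; the proofs are below) =====
def Claim_equal_tich_chia_het : Prop := ∀ (numbers : List Int) (num_digits : Int) (divisible_by : Int) (greater_than : Int) (nho_hon : Int), Dom_tich_chia_het numbers num_digits divisible_by greater_than nho_hon → Pre_tich_chia_het numbers num_digits divisible_by greater_than nho_hon → Spec_tich_chia_het numbers num_digits divisible_by greater_than nho_hon (tich_chia_het numbers num_digits divisible_by greater_than nho_hon)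

-- ===== LEMMAS AND PROOFS =====

def pvProdl (c : List Int) : Int := c.foldl (fun p digit => p * digit) 1

lemma pv_foldl_mul (c : List Int) : ∀ a : Int, c.foldl (fun p digit => p * digit) a = a * pvProdl c := by
  induction c with
  | nil => intro a; simp [pvProdl]
  | cons y ys ih =>
    intro a
    have h2 : pvProdl (y :: ys) = y * pvProdl ys := by
      rw [show pvProdl (y :: ys) = List.foldl (fun p digit => p * digit) (1 * y) ys from rfl,
        one_mul, ih y]
    rw [List.foldl_cons, ih (a * y), h2]; ring

lemma pvProdl_cons (x : Int) (c : List Int) : pvProdl (x :: c) = x * pvProdl c := by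
  rw [show pvProdl (x :: c) = List.foldl (fun p digit => p * digit) (1 * x) c from rfl,
    one_mul, pv_foldl_mul c x]

def pvPred (d g nh prod : Int) (c : List Int) : Bool := pvOk d g nh (prod * pvProdl c)

lemma pv_foldl_filter (d g nh : Int) (L : List (List Int)) :
    ∀ (c : Int) (r : List (List Int)),
    L.foldl
      (fun st combination =>
        let product := combination.foldl (fun p digit => p * digit) 1
        if pvOk d g nh product then (st.1 + 1, st.2 ++ [combination]) else st)
      (c, r)
    = (c + ((L.filter (pvPred d g nh 1)).length : Int),
       r ++ L.filter (pvPred d g nh 1)) := by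
  induction L with
  | nil => intro c r; simp
  | cons comb rest ih =>
    intro c r
    have hp : (comb.foldl (fun p digit => p * digit) 1) = pvProdl comb := rfl
    have hpr : pvPred d g nh 1 comb = pvOk d g nh (pvProdl comb) := by
      simp [pvPred]
    cases h : pvOk d g nh (pvProdl comb)
    · simp only [List.foldl_cons, hp, h, ih, List.filter_cons, hpr, if_false,
        Bool.false_eq_true]
    · simp only [List.foldl_cons, hp, h, if_true, ih, List.filter_cons, hpr]
      rw [Prod.mk.injEq]
      refine ⟨by push_cast [List.length_cons]; ring, by simp⟩

lemma pv_dfs_eq (d g nh : Int) :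
    ∀ (xs : List Int) (need : Int) (chosen : List Int) (prod : Int), 0 ≤ need →
    pvDfs d g nh xs chosen prod need
    = ((((pvCombos need.toNat xs).filter (pvPred d g nh prod)).length : Int),
       ((pvCombos need.toNat xs).filter (pvPred d g nh prod)).map (chosen ++ ·)) := by
  intro xs
  induction xs with
  | nil =>
    intro need chosen prod hneed
    by_cases h0 : need = 0
    · subst h0
      have hnil : pvPred d g nh prod [] = pvOk d g nh prod := by
        simp [pvPred, pvProdl]
      cases h : pvOk d g nh prod
      · rw [pvDfs]; simp [pvCombos, hnil, h]
      · rw [pvDfs]; simp [pvCombos, hnil, h]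
    · obtain ⟨k, hk⟩ : ∃ k, need.toNat = k + 1 := ⟨need.toNat - 1, by omega⟩
      rw [pvDfs, if_neg h0, hk]
      simp [pvCombos]
  | cons x rest ih =>
    intro need chosen prod hneed
    by_cases h0 : need = 0
    · subst h0
      have hnil : pvPred d g nh prod [] = pvOk d g nh prod := by
        simp [pvPred, pvProdl]
      cases h : pvOk d g nh prod
      · rw [pvDfs]; simp [pvCombos, hnil, h]
      · rw [pvDfs]; simp [pvCombos, hnil, h]
    · obtain ⟨k, hk⟩ : ∃ k, need.toNat = k + 1 := ⟨need.toNat - 1, by omega⟩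
      have hk' : (need - 1).toNat = k := by omega
      rw [pvDfs, if_neg h0]
      rw [ih (need - 1) (chosen ++ [x]) (prod * x) (by omega),
          ih need chosen prod hneed, hk, hk']
      show _ = ((((pvCombos (k+1) (x :: rest)).filter (pvPred d g nh prod)).length : Int),
        ((pvCombos (k+1) (x :: rest)).filter (pvPred d g nh prod)).map (chosen ++ ·))
      rw [pvCombos]
      have hmapfilter :
          ((pvCombos k rest).map (fun c => x :: c)).filter (pvPred d g nh prod)
          = ((pvCombos k rest).filter (pvPred d g nh (prod * x))).map (fun c => x :: c) := by
        rw [List.filter_map]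
        congr 1
        apply List.filter_congr
        intro c _
        simp [Function.comp, pvPred, pvProdl_cons]
        rw [mul_assoc]
      rw [List.filter_append, hmapfilter]
      simp only [List.length_append, List.map_append, List.length_map, List.map_map]
      rw [Prod.mk.injEq]
      refine ⟨by push_cast; ring, ?_⟩
      congr 1
      apply List.map_congr_left
      intro c _
      simp [Function.comp]

-- ===== VERDICT (by name: the statement is the Claim_ definition above) =====
theorem tich_chia_het_spec : Claim_equal_tich_chia_het := by
  intro numbers num_digits d g nh _ hpre
  unfold Spec_tich_chia_het tich_chia_het tich_chia_het_alt
  rw [pv_dfs_eq d g nh numbers num_digits [] 1 hpre.1, pv_foldl_filter]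
  simp [List.map_id']
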